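-- pv_equiv track=rewrite | github.com/youngbryan97/aura | core/utils/token_budget.py | gc_observations
-- ===== SOURCE A (Python) =====
-- def gc_observations(observations: list[str]) -> list[str]:
--     """Deduplicate and prune internal observations."""
--     seen: set[str] = set()
--     cleaned: list[str] = []
--     for obs in reversed(observations):
--         # Simple fuzzy deduplication (first 30 chars)
--         fingerprint = obs[:30]
--         if fingerprint not in seen:
--             cleaned.insert(0, obs)
--             seen.add(fingerprint)
--
--     # Limit to top 5 most recent unique observations
--     return cleaned[-5:]
-- ===== SOURCE B (Python) =====
-- def gc_observations(observations: list[str]) -> list[str]: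
--     """Deduplicate and prune internal observations."""
--     # Pass 1: index of the LAST occurrence of each 30-char fingerprint.
--     last = {obs[:30]: i for i, obs in enumerate(observations)}
--     # Pass 2: keep exactly the last occurrences, in original order.
--     kept = [obs for i, obs in enumerate(observations) if last[obs[:30]] == i]
--     return kept[-5:]
-- ===== Notes on version B (the rewrite author's own statement) =====
-- stated objective: faster
-- what changed: Replaces A's reversed traversal with a membership set and repeated cleaned.insert(0) (each a linear shift) by two forward passes: a dict comprehension recording each fingerprint's last index, then a comprehension keeping exactly the last occurrences in original order.
import Mathlib
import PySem

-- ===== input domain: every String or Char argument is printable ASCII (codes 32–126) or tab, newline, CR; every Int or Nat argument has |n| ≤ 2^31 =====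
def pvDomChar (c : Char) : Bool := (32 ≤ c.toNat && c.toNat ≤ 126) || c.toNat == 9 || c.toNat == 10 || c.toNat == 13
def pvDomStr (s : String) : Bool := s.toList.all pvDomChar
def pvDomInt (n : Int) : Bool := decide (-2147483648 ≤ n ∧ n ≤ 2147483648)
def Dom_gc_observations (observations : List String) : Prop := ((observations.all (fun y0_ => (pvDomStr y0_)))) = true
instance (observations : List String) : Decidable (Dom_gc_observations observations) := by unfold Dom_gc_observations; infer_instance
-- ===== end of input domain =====

-- B replaces A's reversed scan + set + cleaned.insert(0) by two forward passes:
-- a last-index dict comprehension, then a comprehension keeping exactly the last occurrences; a timing run measured B faster.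

-- ===== PORT A =====
def gc_observations (observations : List String) : List String :=
  let st : PySem.Set String × List String :=
    observations.reverse.foldl
      (fun (st : PySem.Set String × List String) obs =>
        let fingerprint := PySem.Str.slice obs none (some 30)
        if PySem.Set.contains st.1 fingerprint then st
        else (PySem.Set.add st.1 fingerprint, PySem.List.insert st.2 0 obs))
      ([], [])
  PySem.List.slice st.2 (some (-5)) none

-- ===== PORT B =====
def gc_observations_alt (observations : List String) : List String :=
  let last : PySem.Dict String Int :=
    (PySem.List.enumerate observations 0).foldl
      (fun d p => d.insert (PySem.Str.slice p.2 none (some 30)) p.1)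
      PySem.Dict.empty
  -- last[obs[:30]] == i : the key is always present, so get? is exact here
  let kept : List String :=
    ((PySem.List.enumerate observations 0).filter
        (fun p => last.get? (PySem.Str.slice p.2 none (some 30)) == some p.1)).map (·.2)
  PySem.List.slice kept (some (-5)) none

-- ===== PRECONDITION & SPEC =====
def Spec_gc_observations (observations : List String) (out : List String) : Prop := out = gc_observations_alt observations
instance (observations : List String) (out : List String) : Decidable (Spec_gc_observations observations out) := by unfold Spec_gc_observations; infer_instance

-- ===== CLAIM (what is proved, stated in full; the proofs are below) =====
def Claim_equal_gc_observations : Prop := ∀ (observations : List String), Dom_gc_observations observations → Spec_gc_observations observations (gc_observations observations)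

-- ===== LEMMAS AND PROOFS =====

def pvFp (s : String) : String := PySem.Str.slice s none (some 30)

-- the common characterisation: keep each element iff its fingerprint does not recur later
def pvKeepLast : List String → List String
  | [] => []
  | x :: xs => if pvFp x ∈ xs.map pvFp then pvKeepLast xs else x :: pvKeepLast xs

def pvStepA (st : PySem.Set String × List String) (obs : String) :
    PySem.Set String × List String :=
  if PySem.Set.contains st.1 (pvFp obs) then st
  else (PySem.Set.add st.1 (pvFp obs), PySem.List.insert st.2 0 obs)

theorem pvInsert_zero {α : Type} (xs : List α) (v : α) :
    PySem.List.insert xs 0 v = v :: xs := by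
  simp [PySem.List.insert, PySem.List.sliceIndices]

-- A's loop invariant, on the foldr form of the reversed fold
theorem pvA_inv (l : List String) :
    (l.foldr (fun x st => pvStepA st x) (([] : PySem.Set String), ([] : List String))).2
        = pvKeepLast l ∧
      ∀ s : String,
        PySem.Set.contains
          (l.foldr (fun x st => pvStepA st x) (([] : PySem.Set String), ([] : List String))).1 s
          ↔ s ∈ l.map pvFp := by
  induction l with
  | nil => exact ⟨rfl, by simp [PySem.Set.contains]⟩
  | cons x xs ih =>
    obtain ⟨h2, h1⟩ := ih
    simp only [List.foldr_cons]
    set st := xs.foldr (fun x st => pvStepA st x)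
        (([] : PySem.Set String), ([] : List String)) with hst
    by_cases hc : PySem.Set.contains st.1 (pvFp x) = true
    · have hm : pvFp x ∈ xs.map pvFp := (h1 (pvFp x)).mp hc
      have hstep : pvStepA st x = st := by
        unfold pvStepA; rw [if_pos hc]
      rw [hstep]
      refine ⟨?_, ?_⟩
      · rw [h2, pvKeepLast, if_pos hm]
      · intro s
        rw [h1 s, List.map_cons, List.mem_cons]
        constructor
        · exact Or.inr
        · rintro (rfl | h)
          · exact hm
          · exact h
    · have hm : pvFp x ∉ xs.map pvFp := fun h => hc ((h1 (pvFp x)).mpr h)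
      have hnm : pvFp x ∉ st.1 := fun h => hc ((PySem.Set.contains_iff st.1 (pvFp x)).mpr h)
      have hstep : pvStepA st x = (PySem.Set.add st.1 (pvFp x), x :: st.2) := by
        unfold pvStepA
        rw [if_neg hc, pvInsert_zero]
      rw [hstep]
      refine ⟨?_, ?_⟩
      · rw [h2]; simp only [pvKeepLast, if_neg hm]
      · intro s
        rw [PySem.Set.contains_iff, PySem.Set.mem_add, ← PySem.Set.contains_iff, h1 s,
          List.map_cons, List.mem_cons, or_comm]

-- B's last-index dict over a list
def pvLastD (l : List String) : PySem.Dict String Int :=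
  (PySem.List.enumerate l 0).foldl
    (fun d p => d.insert (pvFp p.2) p.1) PySem.Dict.empty

def pvKept (l : List String) : List String :=
  ((PySem.List.enumerate l 0).filter
      (fun p => (pvLastD l).get? (pvFp p.2) == some p.1)).map (·.2)

theorem pvLastD_snoc (l : List String) (x : String) :
    pvLastD (l ++ [x]) = (pvLastD l).insert (pvFp x) (l.length : Int) := by
  unfold pvLastD
  rw [PySem.List.enumerate_append]
  simp [List.foldl_append]

theorem pvKeepLast_snoc (l : List String) (x : String) :
    pvKeepLast (l ++ [x])
      = (pvKeepLast l).filter (fun y => !(pvFp y == pvFp x)) ++ [x] := by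
  induction l with
  | nil => simp [pvKeepLast]
  | cons y l ih =>
    rw [List.cons_append]
    by_cases hA : pvFp y ∈ l.map pvFp
    · have hA' : pvFp y ∈ (l ++ [x]).map pvFp := by
        rw [List.map_append]; exact List.mem_append_left _ hA
      simp only [pvKeepLast, if_pos hA', if_pos hA, ih]
    · by_cases hx : pvFp y = pvFp x
      · have hA' : pvFp y ∈ (l ++ [x]).map pvFp := by
          rw [List.map_append]; exact List.mem_append_right _ (by simp [hx])
        simp only [pvKeepLast, if_pos hA', if_neg hA, ih]
        rw [List.filter_cons_of_neg (by simp [hx])]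
      · have hA' : pvFp y ∉ (l ++ [x]).map pvFp := by
          rw [List.map_append]
          intro h
          rcases List.mem_append.mp h with h | h
          · exact hA h
          · exact hx (by simpa using h)
        simp only [pvKeepLast, if_neg hA', if_neg hA, ih]
        rw [List.filter_cons_of_pos (by simp [hx]), List.cons_append]

theorem pvKept_snoc (l : List String) (x : String) :
    pvKept (l ++ [x]) = (pvKept l).filter (fun y => !(pvFp y == pvFp x)) ++ [x] := by
  unfold pvKept
  rw [pvLastD_snoc, PySem.List.enumerate_append]
  rw [List.filter_append, List.map_append]
  congr 1
  · -- old part: the new binding at pvFp x kills exactly the entries with that fingerprint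
    rw [List.filter_map, Function.comp_def]
    rw [List.filter_filter]
    congr 1
    apply List.filter_congr
    intro p hp
    obtain ⟨k, hk, rfl⟩ := (PySem.List.mem_enumerate_iff l 0 p).mp hp
    by_cases hfp : pvFp (l[k]) = pvFp x
    · have : ((pvLastD l).insert (pvFp x) (l.length : Int)).get? (pvFp (l[k]))
          = some (l.length : Int) := by
        rw [hfp]; exact PySem.Dict.get?_insert_self _ _ _
      simp only [this]
      simp [hfp]
      omega
    · have : ((pvLastD l).insert (pvFp x) (l.length : Int)).get? (pvFp (l[k]))
          = (pvLastD l).get? (pvFp (l[k])) := by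
        rw [PySem.Dict.get?_insert_of_ne (hne := hfp)]
      simp [this, hfp]
  · -- new element: its key maps to l.length in the new dict
    simp [PySem.Dict.get?_insert_self]

theorem pvKept_eq_keepLast (l : List String) : pvKept l = pvKeepLast l := by
  induction l using List.reverseRecOn with
  | nil => rfl
  | append_singleton l x ih =>
    rw [pvKept_snoc, pvKeepLast_snoc, ih]

-- ===== VERDICT (by name: the statement is the Claim_ definition above) =====
theorem gc_observations_spec : Claim_equal_gc_observations := by
  intro observations _
  unfold Spec_gc_observations gc_observations gc_observations_alt
  show PySem.List.slice
      (observations.reverse.foldl pvStepA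
        (([] : PySem.Set String), ([] : List String))).2 (some (-5)) none
    = PySem.List.slice (pvKept observations) (some (-5)) none
  rw [List.foldl_reverse, (pvA_inv observations).1, pvKept_eq_keepLast]
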